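-- pv_equiv track=rewrite | github.com/johnkyky/L2S2 | BI423/TD7/BATTISTON_Ugo.py | init_save
-- ===== SOURCE A (Python) =====
-- def init_save(sequence1, sequence2):
-- 	save = []
-- 	for i in range(0, len(sequence2[1]) + 1):
-- 		save.append([])
-- 		for j in range(0, len(sequence1[1]) + 1):
-- 			save[i].append(' ')
--
-- 	for i in range(1, len(save)):
-- 		save[i][0] = sequence2[1][i - 1]
--
-- 	for i in range(1, len(save[0])):
-- 		save[0][i] = sequence1[1][i - 1]
-- 	return save
-- ===== SOURCE B (Python) =====
-- def init_save(sequence1, sequence2):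
-- 	# Build the grid column-major (first the label column, then one column per
-- 	# character of sequence1), then transpose with zip.
-- 	cols = [[' '] + list(sequence2[1])]
-- 	for c in sequence1[1]:
-- 		cols.append([c] + [' '] * len(sequence2[1]))
-- 	return [list(row) for row in zip(*cols)]
-- ===== Notes on version B (the rewrite author's own statement) =====
-- stated objective: alternative
-- what changed: B builds the grid column-major (the label column first, then one column per character of sequence1) and transposes it with zip(*cols), instead of A's row-major fill-with-spaces pass followed by two separate patch loops over the first column and first row.
import Mathlib
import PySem

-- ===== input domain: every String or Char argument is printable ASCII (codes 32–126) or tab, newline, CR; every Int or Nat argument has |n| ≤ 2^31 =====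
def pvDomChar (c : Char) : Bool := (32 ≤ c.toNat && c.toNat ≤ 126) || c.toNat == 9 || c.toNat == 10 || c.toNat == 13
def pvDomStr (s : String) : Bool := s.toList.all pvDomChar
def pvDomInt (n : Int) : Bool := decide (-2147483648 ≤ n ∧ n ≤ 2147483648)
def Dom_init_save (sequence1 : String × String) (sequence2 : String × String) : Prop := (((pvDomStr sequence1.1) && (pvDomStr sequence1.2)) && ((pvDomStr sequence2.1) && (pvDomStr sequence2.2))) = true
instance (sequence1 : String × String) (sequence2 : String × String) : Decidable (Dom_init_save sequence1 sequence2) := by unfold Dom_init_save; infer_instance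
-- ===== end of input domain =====

-- B builds the grid column-major (label column, then one column per character of
-- sequence1) and transposes with zip(*cols); an alternative to A's fill-then-patch passes.


-- ===== PORT A =====
-- s[i] as a 1-character string; the default " " is unreachable in A's loops (index always in range).
def pyCharAt (s : String) (i : Int) : String :=
  String.ofList [PySem.List.pyGetD s.toList i ' ']

-- save = []; for i in range(0, len(sequence2[1]) + 1): save.append([]); for j …: save[i].append(' ')
def initGrid (sequence1 : String × String) (sequence2 : String × String) : List (List String) :=
  (PySem.List.pyRange 0 (PySem.Str.len sequence2.2 + 1) 1).foldl
    (fun save _ =>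
      save ++ [(PySem.List.pyRange 0 (PySem.Str.len sequence1.2 + 1) 1).foldl
        (fun row _ => row ++ [" "]) ([] : List String)])
    []

-- for i in range(1, len(save)): save[i][0] = sequence2[1][i - 1]
def patchCol (sequence2 : String × String) (save : List (List String)) : List (List String) :=
  (PySem.List.pyRange 1 (save.length : Int) 1).foldl
    (fun save i =>
      save.set i.toNat ((PySem.List.pyGetD save i []).set 0 (pyCharAt sequence2.2 (i - 1))))
    save

-- for i in range(1, len(save[0])): save[0][i] = sequence1[1][i - 1]
def patchRow (sequence1 : String × String) (save : List (List String)) : List (List String) :=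
  (PySem.List.pyRange 1 ((PySem.List.pyGetD save 0 []).length : Int) 1).foldl
    (fun save i =>
      save.set 0 ((PySem.List.pyGetD save 0 []).set i.toNat (pyCharAt sequence1.2 (i - 1))))
    save

def init_save (sequence1 : String × String) (sequence2 : String × String) : List (List String) :=
  patchRow sequence1 (patchCol sequence2 (initGrid sequence1 sequence2))

-- ===== PORT B =====
-- zip(*cols): rows up to the shortest column, reading each column at the row index
-- (the default " " is unreachable: the index is below every column's length).
def zipStar (cols : List (List String)) : List (List String) :=
  match cols with
  | [] => []
  | c :: cs =>
    (List.range (cs.foldl (fun m l => min m l.length) c.length)).map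
      (fun i => (c :: cs).map (fun col => col.getD i " "))

def init_save_alt (sequence1 : String × String) (sequence2 : String × String) : List (List String) :=
  let cols :=
    sequence1.2.toList.foldl
      (fun cols c => cols ++ [String.ofList [c] :: List.replicate sequence2.2.toList.length " "])
      [" " :: sequence2.2.toList.map (fun c => String.ofList [c])]
  zipStar cols

-- ===== PRECONDITION & SPEC =====
def Spec_init_save (sequence1 : String × String) (sequence2 : String × String) (out : List (List String)) : Prop := out = init_save_alt sequence1 sequence2
instance (sequence1 : String × String) (sequence2 : String × String) (out : List (List String)) : Decidable (Spec_init_save sequence1 sequence2 out) := by unfold Spec_init_save; infer_instance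

-- ===== CLAIM (what is proved, stated in full; the proofs are below) =====
def Claim_equal_init_save : Prop := ∀ (sequence1 : String × String) (sequence2 : String × String), Dom_init_save sequence1 sequence2 → Spec_init_save sequence1 sequence2 (init_save sequence1 sequence2)

-- ===== LEMMAS AND PROOFS =====

-- the common normal form both ports are reduced to: the grid written row by row
def rowForm (sequence1 sequence2 : String × String) : List (List String) :=
  (" " :: sequence1.2.toList.map (fun c => String.ofList [c])) ::
  sequence2.2.toList.map
    (fun c => String.ofList [c] :: List.replicate sequence1.2.toList.length " ")

-- A loop that reads position pre.length + k of an all-r suffix and overwrites it, for k = 0,1,…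
theorem foldl_readset {α : Type} (d : α) :
    ∀ (l : Nat) (φ : Nat → α → α) (r : α) (pre : List α),
    (List.range l).foldl
        (fun g k => g.set (pre.length + k) (φ k (g.getD (pre.length + k) d)))
        (pre ++ List.replicate l r)
      = pre ++ (List.range l).map (fun k => φ k r) := by
  intro l
  induction l with
  | zero => intro φ r pre; simp
  | succ n ih =>
    intro φ r pre
    rw [List.range_succ_eq_map]
    simp only [List.foldl_cons, List.foldl_map, List.replicate_succ, Nat.add_zero]
    have hget : (pre ++ r :: List.replicate n r).getD pre.length d = r := by
      simp [List.getD]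
    have hset : (pre ++ r :: List.replicate n r).set pre.length (φ 0 r)
        = (pre ++ [φ 0 r]) ++ List.replicate n r := by
      rw [List.set_append]
      simp
    rw [hget, hset]
    have hfun : (fun (g : List α) (k : Nat) =>
          g.set (pre.length + (k + 1)) ((fun j y => φ (j + 1) y) k (g.getD (pre.length + (k + 1)) d)))
        = (fun g k => g.set ((pre ++ [φ 0 r]).length + k)
            ((fun j y => φ (j + 1) y) k (g.getD ((pre ++ [φ 0 r]).length + k) d))) := by
      funext g k
      have : pre.length + (k + 1) = (pre ++ [φ 0 r]).length + k := by simp; omega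
      rw [this]
    rw [hfun, ih (fun j y => φ (j + 1) y) r (pre ++ [φ 0 r])]
    simp [List.map_map, Function.comp_def, Nat.succ_eq_add_one]

-- A loop that only rewrites the head of the list, leaving the tail alone.
theorem foldl_head {α ι : Type} (d : α) :
    ∀ (l : List ι) (f : ι → α → α) (x : α) (rest : List α),
    l.foldl (fun g i => g.set 0 (f i (PySem.List.pyGetD g 0 d))) (x :: rest)
      = (l.foldl (fun y i => f i y) x) :: rest := by
  intro l
  induction l with
  | nil => intro f x rest; rfl
  | cons a t ih =>
    intro f x rest
    simp only [List.foldl_cons, PySem.List.pyGetD, PySem.List.pyGet?_zero_cons, Option.getD_some,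
      List.set_cons_zero]
    exact ih f (f a x) rest

-- reading a list character-by-character through pyGetD over range is just mapping over the list
theorem map_range_pyGetD {β : Type} (cs : List Char) (G : Char → β) :
    (List.range cs.length).map (fun k : Nat => G (PySem.List.pyGetD cs (k : Int) ' '))
      = cs.map G := by
  apply List.ext_getElem
  · simp
  · intro i h1 h2
    simp [PySem.List.pyGetD_natCast]
    rw [List.getElem?_eq_getElem (by simpa using h2)]
    rfl

theorem hrow_lemma : ∀ (l : List Int),
    l.foldl (fun (row : List String) _ => row ++ [" "]) [] = List.replicate l.length " " := by
  intro l
  rw [PySem.List.foldl_append_singleton_eq_map (f := fun _ => " ")]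
  simp [List.map_const']

theorem initGrid_eq (sequence1 sequence2 : String × String) :
    initGrid sequence1 sequence2
      = List.replicate (sequence2.2.toList.length + 1)
          (List.replicate (sequence1.2.toList.length + 1) " ") := by
  unfold initGrid
  rw [PySem.List.foldl_append_singleton_eq_map
    (f := fun _ => (PySem.List.pyRange 0 (PySem.Str.len sequence1.2 + 1) 1).foldl
      (fun row _ => row ++ [" "]) ([] : List String))]
  rw [hrow_lemma]
  simp [List.map_const', PySem.List.length_pyRange_one, PySem.Str.len_eq]

theorem patchCol_eq (sequence2 : String × String) (rep : List String) :
    patchCol sequence2 (List.replicate (sequence2.2.toList.length + 1) rep)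
      = rep :: sequence2.2.toList.map (fun c => rep.set 0 (String.ofList [c])) := by
  unfold patchCol
  set cs2 := sequence2.2.toList with hcs2
  have hlen : ((List.replicate (cs2.length + 1) rep).length : Int) = (cs2.length : Int) + 1 := by
    simp
  rw [hlen, PySem.List.pyRange_one]
  have htn : ((cs2.length : Int) + 1 - 1).toNat = cs2.length := by omega
  rw [htn, List.foldl_map]
  have hrepl : List.replicate (cs2.length + 1) rep = [rep] ++ List.replicate cs2.length rep := by
    simp [List.replicate_succ]
  rw [hrepl]
  have hfun : (fun (g : List (List String)) (k : Nat) =>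
        g.set ((1 + (k : Int)).toNat)
          ((PySem.List.pyGetD g (1 + (k : Int)) []).set 0 (pyCharAt sequence2.2 (1 + (k : Int) - 1))))
      = (fun g k => g.set (([rep] : List (List String)).length + k)
          ((fun (j : Nat) (row : List String) =>
              row.set 0 (String.ofList [PySem.List.pyGetD cs2 (j : Int) ' '])) k
            (g.getD (([rep] : List (List String)).length + k) []))) := by
    funext g k
    have h1 : (1 + (k : Int)).toNat = 1 + k := by omega
    have h2 : (1 + (k : Int)) = ((1 + k : Nat) : Int) := by omega
    have h3 : (1 + (k : Int) - 1) = ((k : Nat) : Int) := by omega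
    rw [h1, h3, h2, PySem.List.pyGetD_natCast]
    simp [pyCharAt, hcs2]
  rw [hfun, foldl_readset ([] : List String) cs2.length
    (fun (j : Nat) (row : List String) =>
      row.set 0 (String.ofList [PySem.List.pyGetD cs2 (j : Int) ' '])) rep [rep]]
  rw [map_range_pyGetD cs2 (fun c => rep.set 0 (String.ofList [c]))]
  simp

theorem patchRow_eq (sequence1 : String × String) (rest : List (List String)) :
    patchRow sequence1 (List.replicate (sequence1.2.toList.length + 1) " " :: rest)
      = (" " :: sequence1.2.toList.map (fun c => String.ofList [c])) :: rest := by
  unfold patchRow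
  set cs1 := sequence1.2.toList with hcs1
  have hget0 : PySem.List.pyGetD (List.replicate (cs1.length + 1) " " :: rest) (0 : Int) [] =
      List.replicate (cs1.length + 1) " " := by
    simp [PySem.List.pyGetD]
  rw [hget0]
  have hlen : ((List.replicate (cs1.length + 1) (" " : String)).length : Int)
      = (cs1.length : Int) + 1 := by simp
  rw [hlen, PySem.List.pyRange_one]
  have htn : ((cs1.length : Int) + 1 - 1).toNat = cs1.length := by omega
  rw [htn, List.foldl_map]
  rw [foldl_head ([] : List String) (List.range cs1.length)
    (fun (k : Nat) (y : List String) =>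
      y.set (1 + (k : Int)).toNat (pyCharAt sequence1.2 (1 + (k : Int) - 1)))]
  congr 1
  have hrepl : List.replicate (cs1.length + 1) (" " : String) = [" "] ++ List.replicate cs1.length " " := by
    simp [List.replicate_succ]
  rw [hrepl]
  have hfun : (fun (row : List String) (k : Nat) =>
        (fun (i : Int) (y : List String) => y.set i.toNat (pyCharAt sequence1.2 (i - 1)))
          (1 + (k : Int)) row)
      = (fun row k => row.set (([" "] : List String).length + k)
          ((fun (j : Nat) (_ : String) => String.ofList [PySem.List.pyGetD cs1 (j : Int) ' ']) k
            (row.getD (([" "] : List String).length + k) " "))) := by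
    funext row k
    have h1 : (1 + (k : Int)).toNat = 1 + k := by omega
    have h3 : (1 + (k : Int) - 1) = ((k : Nat) : Int) := by omega
    simp only [h1, h3, pyCharAt, hcs1]
    simp
  rw [hfun, foldl_readset (" ") cs1.length
    (fun (j : Nat) (_ : String) => String.ofList [PySem.List.pyGetD cs1 (j : Int) ' ']) " " [" "]]
  rw [map_range_pyGetD cs1 (fun c => String.ofList [c])]
  simp

theorem init_save_eq_rowForm (sequence1 sequence2 : String × String) :
    init_save sequence1 sequence2 = rowForm sequence1 sequence2 := by
  unfold init_save rowForm
  rw [initGrid_eq, patchCol_eq, patchRow_eq]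
  simp [List.replicate_succ]

-- the min-of-lengths computed by zipStar over B's equal-length columns
theorem min_fold_const (n : Nat) :
    ∀ (l : List (List String)), (∀ x ∈ l, x.length = n) →
      l.foldl (fun m c => min m c.length) n = n := by
  intro l
  induction l with
  | nil => intro _; rfl
  | cons a t ih =>
    intro h
    simp only [List.foldl_cons, h a (by simp), min_self]
    exact ih (fun x hx => h x (by simp [hx]))

theorem zipStar_cons (c : List String) (cs : List (List String)) :
    zipStar (c :: cs)
      = (List.range (cs.foldl (fun m l => min m l.length) c.length)).map
          (fun i => (c :: cs).map (fun col => col.getD i " ")) := rfl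

theorem init_save_alt_eq_rowForm (sequence1 sequence2 : String × String) :
    init_save_alt sequence1 sequence2 = rowForm sequence1 sequence2 := by
  unfold init_save_alt rowForm
  set cs1 := sequence1.2.toList with hcs1
  set cs2 := sequence2.2.toList with hcs2
  rw [PySem.List.foldl_append_singleton_eq_map]
  simp only [List.singleton_append]
  rw [zipStar_cons]
  have hmin : (cs1.map (fun c => String.ofList [c] :: List.replicate cs2.length " ")).foldl
      (fun m l => min m l.length) (" " :: cs2.map (fun c => String.ofList [c])).length
      = cs2.length + 1 := by
    have hl : (" " :: cs2.map (fun c => String.ofList [c])).length = cs2.length + 1 := by simp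
    rw [hl]
    exact min_fold_const (cs2.length + 1) _ (by intro x hx; simp at hx; obtain ⟨c, _, rfl⟩ := hx; simp)
  rw [hmin]
  apply List.ext_getElem
  · simp
  · intro i h1 h2
    match i with
    | 0 =>
      simp [List.map_map, Function.comp_def]
    | j + 1 =>
      have hj : j < cs2.length := by
        simp only [List.length_map, List.length_range] at h1; omega
      simp only [List.getElem_range, List.getElem_cons_succ, List.getElem_map, List.map_cons,
        List.map_map, Function.comp_def]
      have hcol0 : (" " :: cs2.map (fun c => String.ofList [c])).getD (j + 1) " "
          = String.ofList [cs2[j]] := by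
        simp [List.getD, List.getElem?_eq_getElem (by simpa using hj)]
      rw [hcol0]
      congr 1
      have hsp : ∀ c : Char,
          ((String.ofList [c] :: List.replicate cs2.length " ").getD (j + 1) " ") = " " := by
        intro c
        simp [List.getD]
      simp only [hsp]
      simp [List.map_const']

-- ===== VERDICT (by name: the statement is the Claim_ definition above) =====
theorem init_save_spec : Claim_equal_init_save := by
  intro s1 s2 _
  unfold Spec_init_save
  rw [init_save_eq_rowForm, init_save_alt_eq_rowForm]
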